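-- pv_equiv track=rewrite | github.com/kimjune01/june.kim | worklog/matroid_exchange2.py | compute_min_max_step
-- ===== SOURCE A (Python) =====
-- import itertools
--
-- def compute_min_max_step(neighborhoods):
--     """Min over all orderings of max consecutive sym_diff."""
--     emitters = sorted(neighborhoods.keys())
--     n = len(emitters)
--     if n <= 1:
--         return 0
--
--     if n <= 10:
--         best = float('inf')
--         for perm in itertools.permutations(emitters):
--             mx = max(len(neighborhoods[perm[i]].symmetric_difference(
--                 neighborhoods[perm[i+1]])) for i in range(n-1))
--             best = min(best, mx)
--         return best
--     else:
--         best = float('inf')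
--         for start in emitters:
--             path = [start]
--             visited = {start}
--             mx = 0
--             while len(path) < n:
--                 current = path[-1]
--                 remaining = [e for e in emitters if e not in visited]
--                 nxt = min(remaining,
--                          key=lambda e: len(neighborhoods[current].symmetric_difference(
--                              neighborhoods[e])))
--                 mx = max(mx, len(neighborhoods[current].symmetric_difference(
--                     neighborhoods[nxt])))
--                 path.append(nxt)
--                 visited.add(nxt)
--             best = min(best, mx)
--         return best
-- ===== SOURCE B (Python) =====
-- def compute_min_max_step(neighborhoods):
--     """Min over all orderings of max consecutive sym_diff.
--
--     For n <= 10 the permutation scan is replaced by a bottleneck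
--     Held-Karp dynamic program over (visited-set, last) states; the
--     n > 10 nearest-neighbour heuristic of the original is re-expressed
--     over a shrinking remaining-list (its value is part of the behaviour)."""
--     emitters = sorted(neighborhoods.keys())
--     n = len(emitters)
--     if n <= 1:
--         return 0
--
--     if n <= 10:
--         frontier = {((e,), e): 0 for e in emitters}
--         for _ in range(n - 1):
--             nxt = {}
--             for (vis, last), v in frontier.items():
--                 for e in emitters:
--                     if e not in vis:
--                         key = (tuple(sorted(vis + (e,))), e)
--                         nv = max(v, len(neighborhoods[last].symmetric_difference(
--                             neighborhoods[e])))
--                         cur = nxt.get(key)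
--                         if cur is None or nv < cur:
--                             nxt[key] = nv
--             frontier = nxt
--         return min(frontier.values())
--     else:
--         results = []
--         for start in emitters:
--             remaining = [e for e in emitters if e != start]
--             current, mx = start, 0
--             while remaining:
--                 nxt = remaining[0]
--                 dn = len(neighborhoods[current].symmetric_difference(neighborhoods[nxt]))
--                 for e in remaining[1:]:
--                     de = len(neighborhoods[current].symmetric_difference(neighborhoods[e]))
--                     if de < dn:
--                         nxt, dn = e, de
--                 mx = max(mx, dn)
--                 remaining.remove(nxt)
--                 current = nxt
--             results.append(mx)
--         return min(results)
-- ===== Notes on version B (the rewrite author's own statement) =====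
-- stated objective: alternative
-- what changed: For n <= 10 the O(n!*n) scan over all permutations is replaced by a bottleneck Held-Karp dynamic program over (visited-set, last) states, O(2^n*n^2); the n > 10 nearest-neighbour heuristic (whose value defines the behaviour there) is re-expressed over a shrinking remaining-list with a manual argmin scan instead of a visited-set filter with min(key=...).
import Mathlib
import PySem

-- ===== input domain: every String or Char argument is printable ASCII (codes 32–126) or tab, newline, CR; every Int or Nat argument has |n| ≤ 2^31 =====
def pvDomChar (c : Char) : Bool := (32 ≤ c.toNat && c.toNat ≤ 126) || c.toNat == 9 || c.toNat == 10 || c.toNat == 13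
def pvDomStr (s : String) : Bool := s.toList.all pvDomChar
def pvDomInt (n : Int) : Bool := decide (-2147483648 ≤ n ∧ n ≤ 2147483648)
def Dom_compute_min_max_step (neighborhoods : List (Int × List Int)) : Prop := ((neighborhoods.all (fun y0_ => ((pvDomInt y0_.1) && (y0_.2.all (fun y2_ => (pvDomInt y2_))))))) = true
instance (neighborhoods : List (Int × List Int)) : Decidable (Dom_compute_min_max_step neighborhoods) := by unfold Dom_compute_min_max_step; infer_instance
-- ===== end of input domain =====

-- ===== PORT A =====
-- Header: B replaces A's permutation scan (n <= 10) by a bottleneck Held-Karp DP over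
-- (visited-set, last) states; A's n > 10 nearest-neighbour heuristic, whose value defines
-- the behaviour there, is re-expressed over a shrinking remaining-list with a manual
-- argmin scan.

-- neighborhoods[k] as a Python set
def pvNbr (d : PySem.Dict Int (List Int)) (k : Int) : PySem.Set Int :=
  PySem.Set.ofList (d.getD k [])

-- len(neighborhoods[a].symmetric_difference(neighborhoods[b]))
def pvW (d : PySem.Dict Int (List Int)) (a b : Int) : Int :=
  ((PySem.Set.symmDiff (pvNbr d a) (pvNbr d b)).length : Int)

-- max over consecutive pairs (Python: max(w(p[i],p[i+1]) for i in range(n-1)); lists of length >= 2 only)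
def pvMaxAdj (W : Int → Int → Int) : List Int → Int
  | a :: b :: rest => max (W a b) (pvMaxAdj W (b :: rest))
  | _ => 0

-- best = float('inf'); best = min(best, x)  — accumulator
def pvOMin (best : Option Int) (x : Int) : Option Int :=
  match best with
  | none => some x
  | some b => some (min b x)

-- the inner while-loop of A's greedy branch (runs n - len(path) more times; path's last = current)
def pvGreedyFrom (d : PySem.Dict Int (List Int)) (emitters : List Int) :
    Nat → Int → PySem.Set Int → Int → Int
  | 0, _, _, mx => mx
  | fuel+1, current, visited, mx =>
    let remaining := emitters.filter (fun e => !(PySem.Set.contains visited e))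
    match PySem.List.min? remaining (fun e => pvW d current e) with
    | none => mx
    | some nxt =>
        pvGreedyFrom d emitters fuel nxt (PySem.Set.add visited nxt) (max mx (pvW d current nxt))

-- A's greedy branch (n > 10); B keeps this branch verbatim, so both ports call it
def pvGreedyBest (d : PySem.Dict Int (List Int)) (emitters : List Int) (n : Nat) : Int :=
  (emitters.foldl (fun best start =>
      pvOMin best (pvGreedyFrom d emitters (n - 1) start (PySem.Set.ofList [start]) 0)) none).getD 0

def compute_min_max_step (neighborhoods : List (Int × List Int)) : Int :=
  let d := PySem.Dict.ofList neighborhoods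
  let emitters := PySem.List.sorted d.keys (fun x => x)
  let n := emitters.length
  if n ≤ 1 then 0
  else if n ≤ 10 then
    ((PySem.List.permutations emitters n).foldl
      (fun best p => pvOMin best (pvMaxAdj (pvW d) p)) none).getD 0
  else pvGreedyBest d emitters n

-- ===== PORT B =====
-- key = (tuple(sorted(vis + (e,))), e)
def pvHKKey (vis : List Int) (e : Int) : List Int × Int :=
  (PySem.List.sorted (vis ++ [e]) (fun x => x), e)

-- cur = nxt.get(key); if cur is None or nv < cur: nxt[key] = nv
def pvHKRelax (nxt : PySem.Dict (List Int × Int) Int) (key : List Int × Int) (nv : Int) :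
    PySem.Dict (List Int × Int) Int :=
  match nxt.get? key with
  | none => nxt.insert key nv
  | some cur => if nv < cur then nxt.insert key nv else nxt

-- one pass of the DP: build nxt from frontier
def pvHKStep (d : PySem.Dict Int (List Int)) (emitters : List Int)
    (frontier : PySem.Dict (List Int × Int) Int) : PySem.Dict (List Int × Int) Int :=
  frontier.items.foldl (fun nxt st =>
    emitters.foldl (fun nxt e =>
      if e ∈ st.1.1 then nxt
      else pvHKRelax nxt (pvHKKey st.1.1 e) (max st.2 (pvW d st.1.2 e))) nxt)
    PySem.Dict.empty

-- frontier = {((e,), e): 0 for e in emitters}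
def pvHKInit (emitters : List Int) : PySem.Dict (List Int × Int) Int :=
  emitters.foldl (fun f e => f.insert ([e], e) 0) PySem.Dict.empty

-- B's greedy: manual argmin scan over a shrinking remaining-list (fuel = remaining.length)
def pvGreedy2From (d : PySem.Dict Int (List Int)) :
    Nat → Int → List Int → Int → Int
  | 0, _, _, mx => mx
  | fuel+1, current, remaining, mx =>
    match remaining with
    | [] => mx
    | r0 :: rs =>
      let best := rs.foldl (fun b e =>
          let de := pvW d current e
          if de < b.2 then (e, de) else b) (r0, pvW d current r0)
      pvGreedy2From d fuel best.1 (remaining.erase best.1) (max mx best.2)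

-- results = [ …greedy from each start… ]; return min(results)
def pvGreedy2Best (d : PySem.Dict Int (List Int)) (emitters : List Int) : Int :=
  (PySem.List.min? (emitters.map (fun start =>
      let remaining := emitters.filter (fun e => e ≠ start)
      pvGreedy2From d remaining.length start remaining 0)) (fun v => v)).getD 0

def compute_min_max_step_alt (neighborhoods : List (Int × List Int)) : Int :=
  let d := PySem.Dict.ofList neighborhoods
  let emitters := PySem.List.sorted d.keys (fun x => x)
  let n := emitters.length
  if n ≤ 1 then 0
  else if n ≤ 10 then
    let fin := (List.range (n - 1)).foldl (fun f _ => pvHKStep d emitters f) (pvHKInit emitters)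
    (PySem.List.min? fin.values (fun v => v)).getD 0
  else pvGreedy2Best d emitters

-- ===== PRECONDITION & SPEC =====
def Spec_compute_min_max_step (neighborhoods : List (Int × List Int)) (out : Int) : Prop := out = compute_min_max_step_alt neighborhoods
instance (neighborhoods : List (Int × List Int)) (out : Int) : Decidable (Spec_compute_min_max_step neighborhoods out) := by unfold Spec_compute_min_max_step; infer_instance

-- ===== CLAIM (what is proved, stated in full; the proofs are below) =====
def Claim_equal_compute_min_max_step : Prop := ∀ (neighborhoods : List (Int × List Int)), Dom_compute_min_max_step neighborhoods → Spec_compute_min_max_step neighborhoods (compute_min_max_step neighborhoods)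

-- ===== LEMMAS AND PROOFS =====

-- ---------- proof-only helpers ----------

-- the DP value function: min over orderings of the set `vis` ending at `last`
-- of the maximum consecutive weight (fuel = vis.length)
def pvG (W : Int → Int → Int) : Nat → List Int → Int → Int
  | 0, _, _ => 0
  | fuel+1, vis, last =>
    (PySem.List.min? ((vis.erase last).map
        (fun j => max (pvG W fuel (vis.erase last) j) (W j last))) (fun v => v)).getD 0

-- frontier keys after k steps: strict-sorted (k+1)-subsets of es with a designated last
def pvValid (es : List Int) (k : Nat) (key : List Int × Int) : Prop :=
  key.1.length = k + 1 ∧ List.Pairwise (· < ·) key.1 ∧ (∀ x ∈ key.1, x ∈ es) ∧ key.2 ∈ key.1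

def pvInv (W : Int → Int → Int) (es : List Int) (k : Nat)
    (F : PySem.Dict (List Int × Int) Int) : Prop :=
  F.keys.Nodup ∧
  (∀ key, pvValid es k key → F.get? key = some (pvG W (k + 1) key.1 key.2)) ∧
  (∀ key, ¬ pvValid es k key → F.get? key = none)

def pvOMin2 (o : Option Int) (v : Int) : Option Int :=
  some (match o with | none => v | some c => min c v)

-- ---------- generic Option-min utilities ----------

lemma pvOMin_foldl_some {α : Type} (f : α → Int) (a : Int) (t : List α) :
    t.foldl (fun b p => pvOMin b (f p)) (some a) = some (t.foldl (fun b p => min b (f p)) a) := by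
  induction t generalizing a with
  | nil => rfl
  | cons x t ih => simpa [pvOMin] using ih (min a (f x))

lemma pvOMinFold_spec {α : Type} (f : α → Int) (L : List α) (hL : L ≠ []) :
    (∃ x ∈ L, ((L.foldl (fun b x => pvOMin b (f x)) none).getD 0) = f x) ∧
    (∀ x ∈ L, ((L.foldl (fun b x => pvOMin b (f x)) none).getD 0) ≤ f x) := by
  obtain ⟨h, t, rfl⟩ := List.exists_cons_of_ne_nil hL
  have hfold : ((h :: t).foldl (fun b x => pvOMin b (f x)) none).getD 0
      = (t.map f).foldl min (f h) := by
    rw [List.foldl_cons, show pvOMin none (f h) = some (f h) from rfl,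
      pvOMin_foldl_some, Option.getD_some, List.foldl_map]
  rw [hfold]
  constructor
  · rcases PySem.List.foldl_min_mem (t.map f) (f h) with h1 | h1
    · exact ⟨h, by simp, h1⟩
    · rcases List.mem_map.mp h1 with ⟨x, hx, hfx⟩
      exact ⟨x, by simp [hx], hfx.symm⟩
  · intro x hx
    rcases List.mem_cons.mp hx with rfl | hx
    · exact (PySem.List.foldl_min_le (t.map f) (f x)).1
    · exact (PySem.List.foldl_min_le (t.map f) (f h)).2 (f x) (List.mem_map_of_mem hx)

lemma pvOMin2_foldl_some (a : Int) (t : List Int) :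
    t.foldl pvOMin2 (some a) = some (t.foldl min a) := by
  induction t generalizing a with
  | nil => rfl
  | cons x t ih => simpa [pvOMin2] using ih (min a x)

lemma omin2_foldl (L : List Int) :
    L.foldl pvOMin2 none = PySem.List.min? L (fun v => v) := by
  cases L with
  | nil => rfl
  | cons h t =>
    rw [PySem.List.min?_id_cons]
    simp only [List.foldl_cons, pvOMin2, pvOMin2_foldl_some]

lemma min?_id_congr_mem {L L' : List Int} (h : ∀ v, v ∈ L ↔ v ∈ L') :
    PySem.List.min? L (fun v => v) = PySem.List.min? L' (fun v => v) := by
  cases hm : PySem.List.min? L (fun v => v) with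
  | none =>
    rw [PySem.List.min?_eq_none_iff] at hm
    cases hm' : PySem.List.min? L' (fun v => v) with
    | none => rfl
    | some m' =>
      have := PySem.List.min?_mem hm'
      rw [← h] at this
      simp [hm] at this
  | some m =>
    cases hm' : PySem.List.min? L' (fun v => v) with
    | none =>
      rw [PySem.List.min?_eq_none_iff] at hm'
      have := PySem.List.min?_mem hm
      rw [h] at this
      simp [hm'] at this
    | some m' =>
      have h1 : m ≤ m' := PySem.List.min?_isMin hm m' ((h m').mpr (PySem.List.min?_mem hm'))
      have h2 : m' ≤ m := PySem.List.min?_isMin hm' m ((h m).mp (PySem.List.min?_mem hm))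
      exact congrArg some (le_antisymm h1 h2)

-- ---------- sorted-list utilities ----------

lemma pairwise_lt_of_pairwise_le_nodup {l : List Int}
    (hle : List.Pairwise (· ≤ ·) l) (hnd : l.Nodup) : List.Pairwise (· < ·) l := by
  have := hle.and hnd
  exact this.imp (fun h => lt_of_le_of_ne h.1 h.2)

lemma sorted_pairwise_lt {l : List Int} (hnd : l.Nodup) :
    List.Pairwise (· < ·) (PySem.List.sorted l (fun x => x)) := by
  have hle := PySem.List.sorted_pairwise l (fun x => x)
  have hnd' : (PySem.List.sorted l (fun x => x)).Nodup :=
    (PySem.List.sorted_perm l (fun x => x) false).nodup_iff.mpr hnd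
  exact pairwise_lt_of_pairwise_le_nodup hle hnd'

lemma eq_of_perm_of_pairwise_lt {l₁ l₂ : List Int} (hp : l₁.Perm l₂)
    (h₁ : List.Pairwise (· < ·) l₁) (h₂ : List.Pairwise (· < ·) l₂) : l₁ = l₂ := by
  have e₁ : PySem.List.sorted l₂ (fun x => x) = l₁ :=
    PySem.List.sorted_eq_of_perm_of_pairwise_lt l₂ l₁ (fun x => x) hp h₁
  have e₂ : PySem.List.sorted l₂ (fun x => x) = l₂ :=
    PySem.List.sorted_eq_of_perm_of_pairwise_lt l₂ l₂ (fun x => x) (List.Perm.refl l₂) h₂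
  rw [← e₁, e₂]

-- ---------- pvG ----------

lemma pvG_perm (W : Int → Int → Int) :
    ∀ (fuel : Nat) (vis vis' : List Int) (last : Int), vis.Perm vis' →
      pvG W fuel vis last = pvG W fuel vis' last := by
  intro fuel
  induction fuel with
  | zero => intro vis vis' last _; rfl
  | succ fuel ih =>
    intro vis vis' last hp
    have he : (vis.erase last).Perm (vis'.erase last) := hp.erase last
    simp only [pvG]
    congr 1
    apply min?_id_congr_mem
    intro v
    constructor
    · intro hv
      rcases List.mem_map.mp hv with ⟨j, hj, rfl⟩
      exact List.mem_map.mpr ⟨j, he.mem_iff.mp hj, by rw [ih _ _ _ he]⟩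
    · intro hv
      rcases List.mem_map.mp hv with ⟨j, hj, rfl⟩
      exact List.mem_map.mpr ⟨j, he.mem_iff.mpr hj, by rw [ih _ _ _ he]⟩

lemma pvMaxAdj_append (W : Int → Int → Int) (q : List Int) (hq : q ≠ []) (e : Int) :
    pvMaxAdj W (q ++ [e]) = max (pvMaxAdj W q) (W (q.getLast hq) e) := by
  induction q with
  | nil => exact absurd rfl hq
  | cons a q ih =>
    cases q with
    | nil => simp [pvMaxAdj, max_comm]
    | cons b r =>
      have h' : b :: r ≠ [] := by simp
      simp only [List.cons_append, pvMaxAdj]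
      have hih := ih h'
      simp only [List.cons_append] at hih
      rw [hih, List.getLast_cons h', max_assoc]

lemma pvG_le_maxAdj (W : Int → Int → Int) :
    ∀ (p : List Int) (hp : p ≠ []), p.Nodup →
      pvG W p.length p (p.getLast hp) ≤ pvMaxAdj W p := by
  intro p
  induction p using List.reverseRecOn with
  | nil => intro hp; exact absurd rfl hp
  | append_singleton q e ih =>
    intro hp hnd
    have hen : e ∉ q := fun h =>
      (List.disjoint_of_nodup_append hnd) h (List.mem_singleton_self e)
    have herase : (q ++ [e]).erase e = q := by
      rw [List.erase_append, if_neg hen]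
      simp
    by_cases hq' : q = []
    · subst hq'
      have h0 : PySem.List.min? ([] : List Int) (fun v => v) = none :=
        (PySem.List.min?_eq_none_iff _ _).mpr rfl
      simp [pvG, pvMaxAdj, h0]
    have hlast : (q ++ [e]).getLast hp = e := by
      simp
    rw [hlast]
    have hlen : (q ++ [e]).length = q.length + 1 := by simp
    rw [hlen]
    simp only [pvG, herase]
    set j0 := q.getLast hq' with hj0
    have hj0mem : j0 ∈ q := List.getLast_mem hq'
    set L := q.map (fun j => max (pvG W q.length q j) (W j e)) with hL
    have hLne : L ≠ [] := by simp [hL, hq']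
    obtain ⟨m, hm⟩ : ∃ m, PySem.List.min? L (fun v => v) = some m := by
      cases hmm : PySem.List.min? L (fun v => v) with
      | none => rw [PySem.List.min?_eq_none_iff] at hmm; exact absurd hmm hLne
      | some m => exact ⟨m, rfl⟩
    rw [hm, Option.getD_some]
    have hcand : max (pvG W q.length q j0) (W j0 e) ∈ L :=
      List.mem_map.mpr ⟨j0, hj0mem, rfl⟩
    have h1 : m ≤ max (pvG W q.length q j0) (W j0 e) :=
      PySem.List.min?_isMin hm _ hcand
    have hndq : q.Nodup := (List.nodup_append.mp hnd).1
    have h2 : pvG W q.length q j0 ≤ pvMaxAdj W q := by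
      have := ih hq' hndq
      rwa [← hj0] at this
    calc m ≤ max (pvG W q.length q j0) (W j0 e) := h1
      _ ≤ max (pvMaxAdj W q) (W j0 e) := max_le_max h2 le_rfl
      _ = pvMaxAdj W (q ++ [e]) := (pvMaxAdj_append W q hq' e).symm

lemma exists_path_of_pvG (W : Int → Int → Int) :
    ∀ (n : Nat) (vis : List Int) (last : Int), vis.length = n → vis.Nodup → last ∈ vis →
      ∃ p, p.Perm vis ∧ p.getLast? = some last ∧ pvMaxAdj W p = pvG W vis.length vis last := by
  intro n
  induction n with
  | zero =>
    intro vis last hlen _ hmem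
    rw [List.length_eq_zero_iff] at hlen
    subst hlen; simp at hmem
  | succ k ih =>
    intro vis last hlen hnd hmem
    by_cases hk : k = 0
    · -- vis = [last]
      subst hk
      obtain ⟨x, rfl⟩ := List.length_eq_one_iff.mp hlen
      have hx : x = last := by have := hmem; simp at this; omega
      subst hx
      refine ⟨[x], List.Perm.refl _, rfl, ?_⟩
      have h0 : PySem.List.min? ([] : List Int) (fun v => v) = none :=
        (PySem.List.min?_eq_none_iff _ _).mpr rfl
      simp [pvG, pvMaxAdj, h0]
    · set rest := vis.erase last with hrest
      have hrlen : rest.length = k := by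
        rw [hrest, List.length_erase_of_mem hmem, hlen]; omega
      have hrne : rest ≠ [] := by
        intro h; rw [h] at hrlen; simp at hrlen; omega
      have hrnd : rest.Nodup := hnd.sublist List.erase_sublist
      -- pvG unfolds
      have hglen : vis.length = k + 1 := hlen
      rw [hglen]
      simp only [pvG, ← hrest]
      set L := rest.map (fun j => max (pvG W k rest j) (W j last)) with hL
      have hLne : L ≠ [] := by simp [hL, hrne]
      obtain ⟨m, hm⟩ : ∃ m, PySem.List.min? L (fun v => v) = some m := by
        cases hmm : PySem.List.min? L (fun v => v) with
        | none => rw [PySem.List.min?_eq_none_iff] at hmm; exact absurd hmm hLne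
        | some m => exact ⟨m, rfl⟩
      rw [hm, Option.getD_some]
      obtain ⟨j, hjmem, hjval⟩ := List.mem_map.mp (PySem.List.min?_mem hm)
      obtain ⟨p', hp'perm, hp'last, hp'val⟩ := ih rest j hrlen hrnd hjmem
      have hp'ne : p' ≠ [] := by
        intro h; subst h
        exact hrne (hp'perm.symm.eq_nil ▸ rfl)
      refine ⟨p' ++ [last], ?_, List.getLast?_concat, ?_⟩
      · have h1 : (p' ++ [last]).Perm (last :: p') := List.perm_append_singleton _ _
        have h2 : (last :: p').Perm (last :: rest) := hp'perm.cons last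
        have h3 : (last :: rest).Perm vis := (List.perm_cons_erase hmem).symm
        exact (h1.trans h2).trans h3
      · rw [pvMaxAdj_append W p' hp'ne last]
        have hlast' : p'.getLast hp'ne = j := by
          have := hp'last
          rw [List.getLast?_eq_some_getLast hp'ne] at this
          exact Option.some_inj.mp this
        rw [hlast', hp'val, hrlen]
        exact hjval

-- ---------- permutations ----------

lemma mem_permutations_of_perm :
    ∀ (p xs : List Int), p.Perm xs → p ∈ PySem.List.permutations xs xs.length := by
  intro p
  induction p with
  | nil =>
    intro xs hp
    have : xs = [] := hp.symm.eq_nil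
    subst this
    simp [PySem.List.permutations_zero]
  | cons x p' ih =>
    intro xs hp
    have hx : x ∈ xs := hp.mem_iff.mp (by simp)
    obtain ⟨i, hi⟩ := List.mem_iff_getElem?.mp hx
    have hilt : i < xs.length := (List.getElem?_eq_some_iff.mp hi).1
    have hlen : xs.length = p'.length + 1 := by
      have := hp.length_eq; simpa using this.symm
    rw [hlen, PySem.List.permutations_succ]
    apply List.mem_flatMap.mpr
    refine ⟨i, by simp [List.mem_range, hilt], ?_⟩
    rw [hi]
    apply List.mem_map.mpr
    refine ⟨p', ?_, rfl⟩
    have hperase : p'.Perm (xs.eraseIdx i) := by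
      have h1 : (x :: xs.eraseIdx i).Perm xs := PySem.List.perm_cons_eraseIdx xs hi
      exact (hp.trans h1.symm).cons_inv
    have helen : (xs.eraseIdx i).length = p'.length := by
      rw [List.length_eraseIdx_of_lt hilt, hlen]; omega
    have := ih (xs.eraseIdx i) hperase
    rwa [helen] at this

-- ---------- the DP dictionary ----------

lemma foldl_flatMap' {α β γ : Type} (l : List α) (g : α → List β) (f : γ → β → γ) (init : γ) :
    (l.flatMap g).foldl f init = l.foldl (fun acc x => (g x).foldl f acc) init := by
  induction l generalizing init with
  | nil => rfl
  | cons x l ih => simp only [List.flatMap_cons, List.foldl_append, List.foldl_cons, ih]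

lemma get?_pvHKRelax (D : PySem.Dict (List Int × Int) Int) (k key : List Int × Int) (v : Int) :
    (pvHKRelax D k v).get? key = if k = key then pvOMin2 (D.get? key) v else D.get? key := by
  unfold pvHKRelax
  by_cases hk : k = key
  · subst hk
    cases hget : D.get? k with
    | none => simp [pvOMin2]
    | some cur =>
      by_cases hlt : v < cur
      · simp [hlt, pvOMin2, min_comm cur v, min_eq_left (le_of_lt hlt)]
      · simp [hlt, hget, pvOMin2, min_eq_left (le_of_not_gt hlt)]
  · cases hget : D.get? k with
    | none => simp [PySem.Dict.get?_insert, hk, Ne.symm hk]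
    | some cur =>
      by_cases hlt : v < cur
      · simp [hlt, PySem.Dict.get?_insert, hk, Ne.symm hk]
      · simp [hlt, hk]

lemma nodup_keys_pvHKRelax (D : PySem.Dict (List Int × Int) Int) (k : List Int × Int) (v : Int)
    (h : D.keys.Nodup) : (pvHKRelax D k v).keys.Nodup := by
  unfold pvHKRelax
  cases D.get? k with
  | none => exact PySem.Dict.nodup_keys_insert D k v h
  | some cur =>
    by_cases hlt : v < cur
    · simpa [hlt] using PySem.Dict.nodup_keys_insert D k v h
    · simpa [hlt] using h

lemma get?_relax_foldl (cands : List ((List Int × Int) × Int)) :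
    ∀ (D : PySem.Dict (List Int × Int) Int) (key : List Int × Int),
      (cands.foldl (fun d kv => pvHKRelax d kv.1 kv.2) D).get? key
        = ((cands.filter (fun kv => kv.1 = key)).map (·.2)).foldl pvOMin2 (D.get? key) := by
  induction cands with
  | nil => intro D key; rfl
  | cons kv rest ih =>
    intro D key
    simp only [List.foldl_cons, ih, List.filter_cons]
    by_cases hk : kv.1 = key
    · simp [hk, get?_pvHKRelax]
    · simp [hk, get?_pvHKRelax]

lemma nodup_keys_relax_foldl (cands : List ((List Int × Int) × Int)) :
    ∀ (D : PySem.Dict (List Int × Int) Int), D.keys.Nodup →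
      (cands.foldl (fun d kv => pvHKRelax d kv.1 kv.2) D).keys.Nodup := by
  induction cands with
  | nil => intro D h; exact h
  | cons kv rest ih =>
    intro D h
    exact ih _ (nodup_keys_pvHKRelax D kv.1 kv.2 h)

lemma get?_pvHKInit (es : List Int) (key : List Int × Int) :
    ∀ (D : PySem.Dict (List Int × Int) Int),
      (es.foldl (fun f e => f.insert ([e], e) 0) D).get? key
        = if key.2 ∈ es ∧ key.1 = [key.2] then some 0 else D.get? key := by
  induction es with
  | nil => intro D; simp
  | cons e es ih =>
    intro D
    rw [List.foldl_cons, ih]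
    by_cases hmem : key.2 ∈ es ∧ key.1 = [key.2]
    · simp [hmem.1, hmem.2]
    · rw [if_neg hmem, PySem.Dict.get?_insert]
      by_cases hke : key = ([e], e)
      · have : key.2 ∈ e :: es ∧ key.1 = [key.2] := by
          constructor
          · rw [hke]; simp
          · rw [hke]
        rw [if_pos hke, if_pos this]
      · have hnot : ¬ (key.2 ∈ e :: es ∧ key.1 = [key.2]) := by
          intro ⟨h1, h2⟩
          rcases List.mem_cons.mp h1 with h1 | h1
          · exact hke (by rw [Prod.ext_iff]; exact ⟨by rw [h2, h1], h1⟩)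
          · exact hmem ⟨h1, h2⟩
        rw [if_neg hke, if_neg hnot]

lemma pvG_one (W : Int → Int → Int) (x : Int) : pvG W 1 [x] x = 0 := by
  have h0 : PySem.List.min? ([] : List Int) (fun v => v) = none :=
    (PySem.List.min?_eq_none_iff _ _).mpr rfl
  simp [pvG, h0]

lemma inv_init (d : PySem.Dict Int (List Int)) (es : List Int) :
    pvInv (pvW d) es 0 (pvHKInit es) := by
  refine ⟨?_, ?_, ?_⟩
  · exact PySem.Dict.nodup_keys_foldl_insert_key es (fun e => ([e], e)) _ _
      PySem.Dict.nodup_keys_empty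
  · intro key hv
    obtain ⟨hlen, hpw, hsub, hmem⟩ := hv
    have hkey1 : key.1 = [key.2] := by
      obtain ⟨x, hx⟩ := List.length_eq_one_iff.mp hlen
      rw [hx] at hmem ⊢
      simp at hmem
      rw [hmem]
    have hmemes : key.2 ∈ es := hsub key.2 hmem
    rw [pvHKInit, get?_pvHKInit, if_pos ⟨hmemes, hkey1⟩, hkey1]
    rw [show (0 : Nat) + 1 = 1 from rfl, pvG_one]
  · intro key hv
    rw [pvHKInit, get?_pvHKInit]
    rw [if_neg, PySem.Dict.get?_empty]
    intro ⟨h1, h2⟩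
    exact hv ⟨by rw [h2]; rfl, by rw [h2]; simp, by
      intro x hx; rw [h2] at hx; simp at hx; rw [hx]; exact h1, by rw [h2]; simp⟩

lemma pvHKStep_eq (d : PySem.Dict Int (List Int)) (es : List Int)
    (F : PySem.Dict (List Int × Int) Int) :
    pvHKStep d es F
      = (F.items.flatMap (fun st => (es.filter (fun e => e ∉ st.1.1)).map
            (fun e => (pvHKKey st.1.1 e, max st.2 (pvW d st.1.2 e))))).foldl
          (fun dd kv => pvHKRelax dd kv.1 kv.2) PySem.Dict.empty := by
  rw [pvHKStep, foldl_flatMap']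
  apply PySem.List.foldl_congr_mem
  intro acc st _
  rw [List.foldl_map]
  have : ∀ (a : PySem.Dict (List Int × Int) Int) (e : Int),
      (if e ∈ st.1.1 then a
        else pvHKRelax a (pvHKKey st.1.1 e) (max st.2 (pvW d st.1.2 e)))
      = (if e ∉ st.1.1 then pvHKRelax a (pvHKKey st.1.1 e) (max st.2 (pvW d st.1.2 e)) else a) := by
    intro a e
    by_cases h : e ∈ st.1.1 <;> simp [h]
  simp only [this]
  rw [PySem.List.foldl_ite_eq_foldl_filter]

lemma inv_step (d : PySem.Dict Int (List Int)) (es : List Int) (k : Nat)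
    (F : PySem.Dict (List Int × Int) Int) (hF : pvInv (pvW d) es k F) :
    pvInv (pvW d) es (k + 1) (pvHKStep d es F) := by
  obtain ⟨hnd, hpos, hneg⟩ := hF
  -- items membership characterization
  have hitems : ∀ k0 v0, ((k0, v0) ∈ F.items)
      ↔ (pvValid es k k0 ∧ v0 = pvG (pvW d) (k + 1) k0.1 k0.2) := by
    intro k0 v0
    rw [← PySem.Dict.get?_eq_some_iff_mem_items F k0 v0 hnd]
    constructor
    · intro hget
      by_cases hv : pvValid es k k0
      · refine ⟨hv, ?_⟩
        rw [hpos k0 hv] at hget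
        exact (Option.some_inj.mp hget).symm
      · rw [hneg k0 hv] at hget; exact absurd hget (by simp)
    · intro ⟨hv, he⟩
      rw [he]
      exact hpos k0 hv
  set cands := F.items.flatMap (fun st => (es.filter (fun e => e ∉ st.1.1)).map
      (fun e => (pvHKKey st.1.1 e, max st.2 (pvW d st.1.2 e)))) with hcands
  have hstep : pvHKStep d es F
      = cands.foldl (fun dd kv => pvHKRelax dd kv.1 kv.2) PySem.Dict.empty :=
    pvHKStep_eq d es F
  have hget : ∀ key, (pvHKStep d es F).get? key
      = PySem.List.min? ((cands.filter (fun kv => kv.1 = key)).map (·.2)) (fun v => v) := by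
    intro key
    rw [hstep, get?_relax_foldl, PySem.Dict.get?_empty, omin2_foldl]
  -- membership in the candidate-value list
  have hmemL : ∀ key v, (v ∈ (cands.filter (fun kv => kv.1 = key)).map (·.2))
      ↔ ∃ vis last, (pvValid es k (vis, last)) ∧
          ∃ e, e ∈ es ∧ e ∉ vis ∧ pvHKKey vis e = key ∧
            v = max (pvG (pvW d) (k + 1) vis last) (pvW d last e) := by
    intro key v
    simp only [List.mem_map, List.mem_filter, List.mem_flatMap, hcands]
    constructor
    · rintro ⟨⟨kk, vv⟩, ⟨⟨⟨k0, v0⟩, hst, hc⟩, hkey⟩, rfl⟩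
      simp only at hc
      obtain ⟨e, ⟨hees, henv⟩, hkv⟩ := hc
      rw [hitems] at hst
      obtain ⟨hv0, hval⟩ := hst
      have h1 : pvHKKey k0.1 e = kk := congrArg Prod.fst hkv
      have h2 : max v0 (pvW d k0.2 e) = vv := congrArg Prod.snd hkv
      have hkk : kk = key := of_decide_eq_true hkey
      refine ⟨k0.1, k0.2, hv0, e, hees, by simpa using of_decide_eq_true henv,
        by rw [h1, hkk], ?_⟩
      simp only
      rw [← h2, hval]
    · rintro ⟨vis, last, hv, e, hees, henv, hkey, rfl⟩
      refine ⟨(pvHKKey vis e, max (pvG (pvW d) (k + 1) vis last) (pvW d last e)),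
        ⟨⟨((vis, last), pvG (pvW d) (k + 1) vis last), (hitems _ _).mpr ⟨hv, rfl⟩, ?_⟩, ?_⟩, rfl⟩
      · exact ⟨e, ⟨hees, decide_eq_true henv⟩, rfl⟩
      · simpa using hkey
  refine ⟨?_, ?_, ?_⟩
  · rw [hstep]
    exact nodup_keys_relax_foldl cands PySem.Dict.empty PySem.Dict.nodup_keys_empty
  · -- valid keys get the DP value
    rintro ⟨vis', last'⟩ hv
    obtain ⟨hlen, hpw, hsub, hmem⟩ := hv
    simp only at hlen hpw hsub hmem
    have hnd' : vis'.Nodup := hpw.imp ne_of_lt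
    set rest := vis'.erase last' with hrest
    have hrpw : List.Pairwise (· < ·) rest := hpw.sublist List.erase_sublist
    have hrlen : rest.length = k + 1 := by
      rw [hrest, List.length_erase_of_mem hmem, hlen]; omega
    have hrsub : ∀ x ∈ rest, x ∈ es := fun x hx => hsub x (List.erase_sublist.mem hx)
    have hrne : rest ≠ [] := by intro h; rw [h] at hrlen; simp at hrlen
    have hlmem : last' ∈ es := hsub last' hmem
    have hlnr : last' ∉ rest := hnd'.not_mem_erase
    set L' := rest.map (fun j => max (pvG (pvW d) (k + 1) rest j) (pvW d j last')) with hL'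
    -- mem-equivalence with the pvG candidate list
    have hcong : ∀ v, (v ∈ (cands.filter (fun kv => kv.1 = (vis', last'))).map (·.2))
        ↔ v ∈ L' := by
      intro v
      rw [hmemL]
      constructor
      · rintro ⟨vis, last, ⟨hvlen, hvpw, hvsub, hvmem⟩, e, hees, henv, hkey, rfl⟩
        simp only at hvlen hvpw hvsub hvmem
        have he2 : e = last' := congrArg Prod.snd hkey
        subst he2
        have h1 : PySem.List.sorted (vis ++ [e]) (fun x => x) = vis' :=
          congrArg Prod.fst hkey
        have hperm : vis'.Perm (vis ++ [e]) := by
          rw [← h1]; exact PySem.List.sorted_perm _ _ _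
        have hrv : rest = vis := by
          apply eq_of_perm_of_pairwise_lt _ hrpw hvpw
          have h2 := hperm.erase e
          have h3 : (vis ++ [e]).erase e = vis := by
            rw [List.erase_append, if_neg henv]; simp
          rw [h3] at h2
          exact h2
        rw [← hrv] at hvmem ⊢
        exact List.mem_map.mpr ⟨last, hvmem, rfl⟩
      · intro hvv
        obtain ⟨j, hj, rfl⟩ := List.mem_map.mp hvv
        refine ⟨rest, j, ⟨hrlen, hrpw, hrsub, hj⟩, last', hlmem, hlnr, ?_, rfl⟩
        unfold pvHKKey
        have hperm2 : (rest ++ [last']).Perm vis' :=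
          (List.perm_append_singleton last' rest).trans (List.perm_cons_erase hmem).symm
        have : PySem.List.sorted (rest ++ [last']) (fun x => x) = vis' :=
          PySem.List.sorted_eq_of_perm_of_pairwise_lt _ _ _ hperm2.symm hpw
        rw [this]
    rw [hget, min?_id_congr_mem hcong]
    have hL'ne : L' ≠ [] := by simp [hL', hrne]
    obtain ⟨m, hm⟩ : ∃ m, PySem.List.min? L' (fun v => v) = some m := by
      cases hmm : PySem.List.min? L' (fun v => v) with
      | none => rw [PySem.List.min?_eq_none_iff] at hmm; exact absurd hmm hL'ne
      | some m => exact ⟨m, rfl⟩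
    rw [hm]
    have hval : pvG (pvW d) (k + 1 + 1) vis' last' = m := by
      rw [show pvG (pvW d) (k + 1 + 1) vis' last'
          = (PySem.List.min? ((vis'.erase last').map
              (fun j => max (pvG (pvW d) (k + 1) (vis'.erase last') j) (pvW d j last')))
              (fun v => v)).getD 0 from rfl]
      rw [← hrest, ← hL', hm, Option.getD_some]
    rw [hval]
  · -- invalid keys are absent
    rintro key hv
    rw [hget key]
    rw [PySem.List.min?_eq_none_iff]
    by_contra hne
    obtain ⟨v, hvmem⟩ := List.exists_mem_of_ne_nil _ hne
    rw [hmemL] at hvmem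
    obtain ⟨vis, last, ⟨hvlen, hvpw, hvsub, hvmem'⟩, e, hees, henv, hkey, rfl⟩ := hvmem
    apply hv
    rw [← hkey]
    have hndve : (vis ++ [e]).Nodup := by
      rw [List.nodup_append]
      refine ⟨hvpw.imp ne_of_lt, List.nodup_singleton e, ?_⟩
      intro a ha b hb hab
      simp only [List.mem_singleton] at hb
      rw [hab, hb] at ha
      exact henv ha
    have hperm := PySem.List.sorted_perm (vis ++ [e]) (fun x => x) false
    refine ⟨?_, ?_, ?_, ?_⟩
    · simpa [pvHKKey, hperm.length_eq] using hvlen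
    · exact sorted_pairwise_lt hndve
    · intro x hx
      simp only [pvHKKey] at hx
      rcases (List.mem_append.mp (hperm.mem_iff.mp hx)) with h | h
      · exact hvsub x h
      · simp at h; rw [h]; exact hees
    · simp only [pvHKKey]
      exact hperm.mem_iff.mpr (by simp)

lemma inv_iter (d : PySem.Dict Int (List Int)) (es : List Int) :
    ∀ (m : Nat), pvInv (pvW d) es m
      ((List.range m).foldl (fun f _ => pvHKStep d es f) (pvHKInit es)) := by
  intro m
  induction m with
  | zero => exact inv_init d es
  | succ k ih =>
    rw [List.range_succ, List.foldl_append]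
    exact inv_step d es k _ ih

-- ---------- the greedy branch ----------

lemma min?_foldl_some {α : Type} (key : α → Int) (b : α) (rs : List α) :
    rs.foldl (fun acc x => match acc with
      | none => some x
      | some m => if key x < key m then some x else some m) (some b)
      = some (rs.foldl (fun m e => if key e < key m then e else m) b) := by
  induction rs generalizing b with
  | nil => rfl
  | cons x rs ih =>
    simp only [List.foldl_cons]
    by_cases h : key x < key b <;> simp [h, ih]

lemma min?_cons_scan {α : Type} (key : α → Int) (r0 : α) (rs : List α) :
    PySem.List.min? (r0 :: rs) key
      = some (rs.foldl (fun m e => if key e < key m then e else m) r0) := by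
  show (r0 :: rs).foldl (fun acc x => match acc with
      | none => some x
      | some m => if key x < key m then some x else some m) none = _
  rw [List.foldl_cons]
  exact min?_foldl_some key r0 rs

lemma pvOMin_fold_eq_min?_map {α : Type} (f : α → Int) (l : List α) :
    ((l.foldl (fun b x => pvOMin b (f x)) none).getD 0)
      = (PySem.List.min? (l.map f) (fun v => v)).getD 0 := by
  cases l with
  | nil => rfl
  | cons h t =>
    rw [List.foldl_cons, show pvOMin none (f h) = some (f h) from rfl,
      pvOMin_foldl_some, List.map_cons, PySem.List.min?_id_cons, Option.getD_some,
      Option.getD_some, List.foldl_map]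

lemma pair_scan {α : Type} (key : α → Int) (rs : List α) :
    ∀ b : α, rs.foldl (fun b e =>
        let de := key e
        if de < b.2 then (e, de) else b) (b, key b)
      = (rs.foldl (fun m e => if key e < key m then e else m) b,
         key (rs.foldl (fun m e => if key e < key m then e else m) b)) := by
  induction rs with
  | nil => intro b; rfl
  | cons e rs ih =>
    intro b
    simp only [List.foldl_cons]
    by_cases h : key e < key b <;> simp only [h, if_pos, ite_false] <;>
      [exact ih e; exact ih b]

lemma greedy_eq (d : PySem.Dict Int (List Int)) (emitters : List Int)
    (hnd : emitters.Nodup) :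
    ∀ (fuel : Nat) (current : Int) (visited : PySem.Set Int) (mx : Int),
      pvGreedyFrom d emitters fuel current visited mx
        = pvGreedy2From d fuel current
            (emitters.filter (fun e => !(PySem.Set.contains visited e))) mx := by
  intro fuel
  induction fuel with
  | zero => intro current visited mx; rfl
  | succ fuel ih =>
    intro current visited mx
    simp only [pvGreedyFrom, pvGreedy2From]
    cases hrem : emitters.filter (fun e => !(PySem.Set.contains visited e)) with
    | nil => rw [(PySem.List.min?_eq_none_iff _ _).mpr rfl]
    | cons r0 rs =>
      rw [min?_cons_scan]
      simp only
      rw [pair_scan (fun e => pvW d current e) rs r0]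
      set nxt := rs.foldl (fun m e => if pvW d current e < pvW d current m then e else m) r0
        with hnxt
      have hrec := ih nxt (visited.add nxt) (max mx (pvW d current nxt))
      rw [hrec]
      congr 1
      -- remaining lists coincide: filter with the enlarged set = erase from the old filter
      have hfnd : (emitters.filter (fun e => !(PySem.Set.contains visited e))).Nodup :=
        hnd.filter _
      rw [← hrem]
      rw [List.Nodup.erase_eq_filter hfnd nxt, List.filter_filter]
      apply List.filter_congr
      intro e _
      simp only [PySem.Set.contains_eq_decide]
      by_cases h1 : e ∈ visited <;> by_cases h2 : e = nxt <;>
        simp [PySem.Set.mem_add, h1, h2]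

lemma greedyBest_eq (d : PySem.Dict Int (List Int)) (es : List Int)
    (hnd : es.Nodup) : pvGreedyBest d es es.length = pvGreedy2Best d es := by
  unfold pvGreedyBest pvGreedy2Best
  rw [pvOMin_fold_eq_min?_map]
  congr 2
  apply List.map_congr_left
  intro start hstart
  simp only
  have hfil : es.filter (fun e => !(PySem.Set.contains (PySem.Set.ofList [start]) e))
      = es.filter (fun e => e ≠ start) := by
    apply List.filter_congr
    intro e _
    rw [PySem.Set.contains_eq_decide]
    have : PySem.Set.ofList [start] = [start] := rfl
    rw [this]
    by_cases h : e = start <;> simp [h]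
  have herase : es.filter (fun e => e ≠ start) = es.erase start := by
    rw [List.Nodup.erase_eq_filter hnd start]
    apply List.filter_congr
    intro e _
    by_cases h : e = start <;> simp [bne, h]
  have hlen : (es.filter (fun e => e ≠ start)).length = es.length - 1 := by
    rw [herase]
    exact List.length_erase_of_mem hstart
  rw [greedy_eq d es hnd (es.length - 1) start (PySem.Set.ofList [start]) 0, hfil, ← hlen]

-- ---------- assembling the middle branch ----------

lemma middle_branch_eq (d : PySem.Dict Int (List Int)) (es : List Int)
    (hes : List.Pairwise (· < ·) es) (hn : 2 ≤ es.length) :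
    ((PySem.List.permutations es es.length).foldl
        (fun best p => pvOMin best (pvMaxAdj (pvW d) p)) none).getD 0
      = (PySem.List.min?
          ((List.range (es.length - 1)).foldl (fun f _ => pvHKStep d es f) (pvHKInit es)).values
          (fun v => v)).getD 0 := by
  have hnd : es.Nodup := hes.imp ne_of_lt
  have hne : es ≠ [] := by intro h; rw [h] at hn; simp at hn
  set n := es.length with hnn
  set fin := (List.range (n - 1)).foldl (fun f _ => pvHKStep d es f) (pvHKInit es) with hfin
  obtain ⟨hknd, hpos, hneg⟩ := inv_iter d es (n - 1)
  have hn1 : n - 1 + 1 = n := by omega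
  -- the only valid first component at the last level is es itself
  have hkeychar : ∀ key, pvValid es (n - 1) key ↔ (key.1 = es ∧ key.2 ∈ es) := by
    intro key
    constructor
    · rintro ⟨hlen, hpw, hsub, hmem⟩
      have hknodup : key.1.Nodup := hpw.imp ne_of_lt
      have hsp : key.1.Subperm es := List.subperm_of_subset hknodup (fun x hx => hsub x hx)
      have hperm : key.1.Perm es := hsp.perm_of_length_le (by rw [hlen]; omega)
      have he : key.1 = es := eq_of_perm_of_pairwise_lt hperm hpw hes
      exact ⟨he, he ▸ hmem⟩
    · rintro ⟨h1, h2⟩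
      exact ⟨by rw [h1, ← hnn]; omega, h1 ▸ hes, by rw [h1]; exact fun x hx => hx, h1 ▸ h2⟩
  -- characterize membership in fin.values
  have hvalues : ∀ v, v ∈ fin.values ↔ ∃ last ∈ es, v = pvG (pvW d) n es last := by
    intro v
    have hv : fin.values = fin.items.map (·.2) := rfl
    rw [hv]
    constructor
    · intro hvm
      obtain ⟨⟨key, v'⟩, hp, hv'⟩ := List.mem_map.mp hvm
      simp only at hv'
      have hg := (PySem.Dict.get?_eq_some_iff_mem_items fin key v' hknd).mpr hp
      by_cases hval : pvValid es (n - 1) key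
      · obtain ⟨h1, h2⟩ := (hkeychar key).mp hval
        rw [hpos key hval] at hg
        refine ⟨key.2, h2, ?_⟩
        rw [← hv', ← Option.some_inj.mp hg, h1, hn1]
      · rw [hneg key hval] at hg; exact absurd hg (by simp)
    · rintro ⟨last, hl, rfl⟩
      have hval : pvValid es (n - 1) (es, last) := (hkeychar (es, last)).mpr ⟨rfl, hl⟩
      have hg := hpos (es, last) hval
      rw [hn1] at hg
      have := (PySem.Dict.get?_eq_some_iff_mem_items fin (es, last) _ hknd).mp hg
      exact List.mem_map.mpr ⟨((es, last), pvG (pvW d) n es last), this, rfl⟩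
  -- B's value: min over fin.values
  obtain ⟨l0, hl0⟩ := List.exists_mem_of_ne_nil es hne
  have hvne : fin.values ≠ [] := by
    intro h
    have := (hvalues (pvG (pvW d) n es l0)).mpr ⟨l0, hl0, rfl⟩
    rw [h] at this
    simp at this
  obtain ⟨m, hm⟩ : ∃ m, PySem.List.min? fin.values (fun v => v) = some m := by
    cases hmm : PySem.List.min? fin.values (fun v => v) with
    | none => rw [PySem.List.min?_eq_none_iff] at hmm; exact absurd hmm hvne
    | some m => exact ⟨m, rfl⟩
  rw [hm, Option.getD_some]
  obtain ⟨lastm, hlm, hmval⟩ := (hvalues m).mp (PySem.List.min?_mem hm)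
  have hmmin : ∀ last ∈ es, m ≤ pvG (pvW d) n es last := by
    intro last hl
    exact PySem.List.min?_isMin hm _ ((hvalues _).mpr ⟨last, hl, rfl⟩)
  -- A's value: min over all permutations
  set perms := PySem.List.permutations es n with hperms
  have hesmem : es ∈ perms := by
    rw [hperms, hnn]
    exact mem_permutations_of_perm es es (List.Perm.refl es)
  have hpne : perms ≠ [] := List.ne_nil_of_mem hesmem
  obtain ⟨⟨p0, hp0, hr⟩, hbound⟩ := pvOMinFold_spec (pvMaxAdj (pvW d)) perms hpne
  rw [hr] at hbound ⊢
  -- r := cost p0 with p0 a permutation; show cost p0 = m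
  have hAleB : ∀ last ∈ es, ∃ p ∈ perms, pvMaxAdj (pvW d) p = pvG (pvW d) n es last := by
    intro last hl
    obtain ⟨p, hperm, _, hcost⟩ := exists_path_of_pvG (pvW d) n es last hnn.symm hnd hl
    exact ⟨p, by rw [hperms, hnn]; exact mem_permutations_of_perm p es hperm, by rw [hcost, hnn]⟩
  apply le_antisymm
  · -- cost p0 ≤ m
    obtain ⟨p, hp, hcost⟩ := hAleB lastm hlm
    rw [hmval]
    rw [← hcost]
    exact hbound p hp
  · -- m ≤ cost p0
    have hp0perm : p0.Perm es := by
      rw [hperms, hnn] at hp0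
      exact PySem.List.perm_of_mem_permutations hp0
    have hp0ne : p0 ≠ [] := by
      intro h
      rw [h] at hp0perm
      exact hne hp0perm.symm.eq_nil
    have hlp0 : p0.getLast hp0ne ∈ es := hp0perm.mem_iff.mp (List.getLast_mem hp0ne)
    have h1 : pvG (pvW d) p0.length p0 (p0.getLast hp0ne) ≤ pvMaxAdj (pvW d) p0 :=
      pvG_le_maxAdj (pvW d) p0 hp0ne (hp0perm.nodup_iff.mpr hnd)
    have h2 : pvG (pvW d) p0.length p0 (p0.getLast hp0ne)
        = pvG (pvW d) n es (p0.getLast hp0ne) := by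
      rw [hp0perm.length_eq, ← hnn]
      exact pvG_perm (pvW d) n p0 es _ hp0perm
    calc m ≤ pvG (pvW d) n es (p0.getLast hp0ne) := hmmin _ hlp0
      _ = pvG (pvW d) p0.length p0 (p0.getLast hp0ne) := h2.symm
      _ ≤ pvMaxAdj (pvW d) p0 := h1

-- ===== VERDICT (by name: the statement is the Claim_ definition above) =====
lemma branches_eq (d : PySem.Dict Int (List Int)) (es : List Int)
    (hpw : List.Pairwise (· < ·) es) :
    (if es.length ≤ 1 then (0 : Int)
      else if es.length ≤ 10 then
        ((PySem.List.permutations es es.length).foldl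
          (fun best p => pvOMin best (pvMaxAdj (pvW d) p)) none).getD 0
      else pvGreedyBest d es es.length)
    = (if es.length ≤ 1 then (0 : Int)
      else if es.length ≤ 10 then
        (PySem.List.min?
          ((List.range (es.length - 1)).foldl (fun f _ => pvHKStep d es f)
            (pvHKInit es)).values (fun v => v)).getD 0
      else pvGreedy2Best d es) := by
  by_cases h1 : es.length ≤ 1
  · rw [if_pos h1, if_pos h1]
  · by_cases h2 : es.length ≤ 10
    · rw [if_neg h1, if_neg h1, if_pos h2, if_pos h2]
      exact middle_branch_eq d es hpw (by omega)
    · rw [if_neg h1, if_neg h1, if_neg h2, if_neg h2]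
      exact greedyBest_eq d es (hpw.imp ne_of_lt)

theorem compute_min_max_step_spec : Claim_equal_compute_min_max_step := by
  intro nb _
  show compute_min_max_step nb = compute_min_max_step_alt nb
  exact branches_eq (PySem.Dict.ofList nb)
    (PySem.List.sorted (PySem.Dict.ofList nb).keys (fun x => x))
    (sorted_pairwise_lt (PySem.Dict.nodup_keys_ofList nb))
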